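-- pv_equiv track=rewrite | github.com/mercybabayemi/python_class | ClassTask/functionTask/Mr Alfred task/indexsumsubtraction.py | get_index_sum
-- ===== SOURCE A (Python) =====
-- def get_index_sum(numbers):
-- 	total = 0
-- 	final = 0
-- 	for i in numbers:
-- 		for j in numbers:
-- 			final += j
-- 		final = final - i
-- 	return final
-- ===== SOURCE B (Python) =====
-- def get_index_sum(numbers):
-- 	return (len(numbers) - 1) * sum(numbers)
-- ===== Notes on version B (the rewrite author's own statement) =====
-- stated objective: faster
-- what changed: Replaced the nested loops (adding the whole list once per element, then subtracting the element) by the closed form (len(numbers)-1)*sum(numbers).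
import Mathlib
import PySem

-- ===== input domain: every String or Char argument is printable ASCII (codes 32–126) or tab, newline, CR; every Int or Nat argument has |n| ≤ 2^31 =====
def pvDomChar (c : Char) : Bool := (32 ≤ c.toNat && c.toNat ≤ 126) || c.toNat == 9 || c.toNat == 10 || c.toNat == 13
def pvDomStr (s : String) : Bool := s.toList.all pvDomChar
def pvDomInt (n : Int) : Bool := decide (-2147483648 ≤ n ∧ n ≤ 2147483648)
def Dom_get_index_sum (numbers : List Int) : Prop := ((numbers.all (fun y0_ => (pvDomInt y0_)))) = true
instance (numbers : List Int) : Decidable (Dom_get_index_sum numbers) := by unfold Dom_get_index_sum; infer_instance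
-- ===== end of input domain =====

-- B replaces A's O(n^2) nested loops by the closed form (len(numbers)-1)*sum(numbers); faster (asymptotic).

-- ===== PORT A =====
-- for i in numbers: (for j in numbers: final += j); final -= i   (total is assigned but unused)
def get_index_sum (numbers : List Int) : Int :=
  let final : Int := 0
  let final := numbers.foldl (fun final i =>
    (numbers.foldl (fun final j => final + j) final) - i) final
  final

-- ===== PORT B =====
def get_index_sum_alt (numbers : List Int) : Int :=
  ((numbers.length : Int) - 1) * numbers.sum

-- ===== PRECONDITION & SPEC =====
def Spec_get_index_sum (numbers : List Int) (out : Int) : Prop := out = get_index_sum_alt numbers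
instance (numbers : List Int) (out : Int) : Decidable (Spec_get_index_sum numbers out) := by unfold Spec_get_index_sum; infer_instance

-- ===== CLAIM (what is proved, stated in full; the proofs are below) =====
def Claim_equal_get_index_sum : Prop := ∀ (numbers : List Int), Dom_get_index_sum numbers → Spec_get_index_sum numbers (get_index_sum numbers)

-- ===== LEMMAS AND PROOFS =====

theorem inner_foldl_add (numbers : List Int) (acc : Int) :
    numbers.foldl (fun f j => f + j) acc = acc + numbers.sum := by
  induction numbers generalizing acc with
  | nil => simp
  | cons x xs ih => simp [List.foldl, ih, List.sum_cons]; ring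

theorem outer_simple (S : Int) (l : List Int) (acc : Int) :
    l.foldl (fun final i => final + S - i) acc
    = acc + (l.length : Int) * S - l.sum := by
  induction l generalizing acc with
  | nil => simp
  | cons x xs ih =>
    simp [List.foldl, ih, List.sum_cons]
    ring

theorem outer_foldl (numbers l : List Int) (acc : Int) :
    l.foldl (fun final i =>
      (numbers.foldl (fun f j => f + j) final) - i) acc
    = acc + (l.length : Int) * numbers.sum - l.sum := by
  have h : (fun (final i : Int) =>
      (numbers.foldl (fun f j => f + j) final) - i)
      = fun final i => final + numbers.sum - i := by
    funext final i; rw [inner_foldl_add]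
  rw [h, outer_simple]

-- ===== VERDICT (by name: the statement is the Claim_ definition above) =====
theorem get_index_sum_spec : Claim_equal_get_index_sum := by
  intro numbers _
  unfold Spec_get_index_sum get_index_sum get_index_sum_alt
  simp [outer_foldl]
  ring
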